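-- pv_equiv track=rewrite | github.com/cseelhoff/garage | analyze_la1010.py | find_low_pulses
-- ===== SOURCE A (Python) =====
-- def find_edges(samples, ch_idx):
--     """Find all edges on a given channel. Returns list of (time, direction, ch0, ch1, ch2)."""
--     edges = []
--     for i in range(1, len(samples)):
--         prev_val = samples[i-1][ch_idx]
--         curr_val = samples[i][ch_idx]
--         if curr_val != prev_val:
--             direction = "RISE" if curr_val == 1 else "FALL"
--             edges.append((samples[i][0], direction, samples[i][1], samples[i][2], samples[i][3]))
--     return edges
--
-- def find_low_pulses(samples, ch_idx):
--     """Find low pulses (active-low signals like RESET_N)."""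
--     edges = find_edges(samples, ch_idx)
--     pulses = []
--     fall_time = None
--     for t, direction, *_ in edges:
--         if direction == "FALL":
--             fall_time = t
--         elif direction == "RISE" and fall_time is not None:
--             pulses.append((fall_time, t, t - fall_time))
--             fall_time = None
--     return pulses
-- ===== SOURCE B (Python) =====
-- def find_low_pulses(samples, ch_idx):
--     """Find low pulses (active-low signals like RESET_N)."""
--     pulses = []
--     fall_time = None
--     for i in range(1, len(samples)):
--         prev = samples[i-1][ch_idx]
--         curr = samples[i][ch_idx]
--         if curr != prev:
--             if curr == 1:
--                 if fall_time is not None: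
--                     pulses.append((fall_time, samples[i][0], samples[i][0] - fall_time))
--                     fall_time = None
--             else:
--                 fall_time = samples[i][0]
--     return pulses
-- ===== Notes on version B (the rewrite author's own statement) =====
-- stated objective: simpler
-- what changed: Fused the two passes into one loop over samples: no find_edges helper, no materialized edge list, no string direction tags -- the fall/rise state machine runs directly on adjacent sample pairs.
import Mathlib
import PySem

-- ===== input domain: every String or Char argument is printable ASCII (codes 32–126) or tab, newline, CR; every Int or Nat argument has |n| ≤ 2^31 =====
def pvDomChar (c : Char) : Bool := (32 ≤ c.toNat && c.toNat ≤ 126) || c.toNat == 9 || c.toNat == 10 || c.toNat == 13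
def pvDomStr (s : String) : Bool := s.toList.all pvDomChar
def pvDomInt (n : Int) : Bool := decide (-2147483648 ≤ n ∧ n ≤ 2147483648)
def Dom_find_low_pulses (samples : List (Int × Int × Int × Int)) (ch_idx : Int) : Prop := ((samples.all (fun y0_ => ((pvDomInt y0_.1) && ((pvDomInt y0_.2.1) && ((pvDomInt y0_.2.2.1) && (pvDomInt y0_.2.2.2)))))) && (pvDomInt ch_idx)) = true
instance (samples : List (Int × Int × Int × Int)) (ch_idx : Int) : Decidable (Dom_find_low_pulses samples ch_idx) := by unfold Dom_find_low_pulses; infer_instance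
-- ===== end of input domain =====

-- B fuses A's two passes into one loop over adjacent sample pairs (no edge list, no direction strings).

-- shared helper: Python tuple indexing t[i] on a 4-tuple (negative indices wrap; out of
-- range is an IndexError, excluded by Pre_; the 0 default is never reached inside Pre_)
def pvTGet (p : Int × Int × Int × Int) (i : Int) : Int :=
  if i = 0 ∨ i = -4 then p.1
  else if i = 1 ∨ i = -3 then p.2.1
  else if i = 2 ∨ i = -2 then p.2.2.1
  else if i = 3 ∨ i = -1 then p.2.2.2
  else 0

-- ===== PORT A =====
-- loop "for i in range(1, len(samples))": recursion carrying samples[i-1] as prev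
def findEdgesAux (prev : Int × Int × Int × Int) (rest : List (Int × Int × Int × Int))
    (ch_idx : Int) : List (Int × String × Int × Int × Int) :=
  match rest with
  | [] => []
  | c :: tl =>
    if pvTGet c ch_idx ≠ pvTGet prev ch_idx then
      (c.1, if pvTGet c ch_idx = 1 then "RISE" else "FALL", c.2.1, c.2.2.1, c.2.2.2)
        :: findEdgesAux c tl ch_idx
    else findEdgesAux c tl ch_idx

def find_edges (samples : List (Int × Int × Int × Int)) (ch_idx : Int) :
    List (Int × String × Int × Int × Int) :=
  match samples with
  | [] => []
  | h :: t => findEdgesAux h t ch_idx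

def pulseLoop (edges : List (Int × String × Int × Int × Int)) (fall_time : Option Int) :
    List (Int × Int × Int) :=
  match edges with
  | [] => []
  | (t, direction, _, _, _) :: tl =>
    if direction = "FALL" then pulseLoop tl (some t)
    else if direction = "RISE" then
      match fall_time with
      | some f => (f, t, t - f) :: pulseLoop tl none
      | none => pulseLoop tl fall_time
    else pulseLoop tl fall_time

def find_low_pulses (samples : List (Int × Int × Int × Int)) (ch_idx : Int) : List (Int × Int × Int) :=
  pulseLoop (find_edges samples ch_idx) none

-- ===== PORT B =====
def altLoop (prev : Int × Int × Int × Int) (rest : List (Int × Int × Int × Int))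
    (ch_idx : Int) (fall_time : Option Int) : List (Int × Int × Int) :=
  match rest with
  | [] => []
  | c :: tl =>
    if pvTGet c ch_idx ≠ pvTGet prev ch_idx then
      if pvTGet c ch_idx = 1 then
        match fall_time with
        | some f => (f, c.1, c.1 - f) :: altLoop c tl ch_idx none
        | none => altLoop c tl ch_idx fall_time
      else altLoop c tl ch_idx (some c.1)
    else altLoop c tl ch_idx fall_time

def find_low_pulses_alt (samples : List (Int × Int × Int × Int)) (ch_idx : Int) : List (Int × Int × Int) :=
  match samples with
  | [] => []
  | h :: t => altLoop h t ch_idx none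

-- ===== PRECONDITION & SPEC =====
-- Pre_ excludes exactly the inputs where A raises IndexError: a tuple indexed with
-- ch_idx outside -4..3, which only happens when the loop runs (≥ 2 samples).
def Pre_find_low_pulses (samples : List (Int × Int × Int × Int)) (ch_idx : Int) : Prop :=
  samples.length ≤ 1 ∨ (-4 ≤ ch_idx ∧ ch_idx < 4)
instance (samples : List (Int × Int × Int × Int)) (ch_idx : Int) : Decidable (Pre_find_low_pulses samples ch_idx) := by unfold Pre_find_low_pulses; infer_instance

def pvWitness_find_low_pulses : (List (Int × Int × Int × Int)) × Int :=
  ([(0, 1, 0, 0), (2, 0, 0, 0), (5, 1, 0, 0)], 1)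

def Spec_find_low_pulses (samples : List (Int × Int × Int × Int)) (ch_idx : Int) (out : List (Int × Int × Int)) : Prop := out = find_low_pulses_alt samples ch_idx
instance (samples : List (Int × Int × Int × Int)) (ch_idx : Int) (out : List (Int × Int × Int)) : Decidable (Spec_find_low_pulses samples ch_idx out) := by unfold Spec_find_low_pulses; infer_instance

-- ===== CLAIM (what is proved, stated in full; the proofs are below) =====
def Claim_equal_find_low_pulses : Prop := ∀ (samples : List (Int × Int × Int × Int)) (ch_idx : Int), Dom_find_low_pulses samples ch_idx → Pre_find_low_pulses samples ch_idx → Spec_find_low_pulses samples ch_idx (find_low_pulses samples ch_idx)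

-- ===== LEMMAS AND PROOFS =====

-- the fused loop equals "build the edge list, then scan it", for any loop state
theorem altLoop_eq_pulseLoop (rest : List (Int × Int × Int × Int))
    (prev : Int × Int × Int × Int) (ch_idx : Int) (fall_time : Option Int) :
    altLoop prev rest ch_idx fall_time = pulseLoop (findEdgesAux prev rest ch_idx) fall_time := by
  induction rest generalizing prev fall_time with
  | nil => simp [altLoop, findEdgesAux, pulseLoop]
  | cons c tl ih =>
    by_cases hne : pvTGet c ch_idx ≠ pvTGet prev ch_idx
    · by_cases h1 : pvTGet c ch_idx = 1
      · rw [h1] at hne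
        cases fall_time <;>
          simp [altLoop, findEdgesAux, pulseLoop, hne, h1, ih]
      · simp [altLoop, findEdgesAux, pulseLoop, hne, h1, ih]
    · simp [altLoop, findEdgesAux, hne, ih]

-- ===== VERDICT (by name: the statement is the Claim_ definition above) =====
theorem find_low_pulses_spec : Claim_equal_find_low_pulses := by
  intro samples ch_idx _ _
  unfold Spec_find_low_pulses find_low_pulses find_low_pulses_alt find_edges
  cases samples with
  | nil => simp [pulseLoop]
  | cons h t => exact (altLoop_eq_pulseLoop t h ch_idx none).symm
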